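-- pv_equiv track=rewrite | github.com/EvgeniiKovalev/python_self_training | py_test/main.py | method_two
-- ===== SOURCE A (Python) =====
-- def method_two(src : list) -> bool:
--     present_one = False
--     present_two = False
--
--     for item in src:
--         if item == 1:
--             present_one = True
--             continue
--         if item == 2:
--             present_two = True
--             continue
--         return False
--
--     return  present_one and present_two
-- ===== SOURCE B (Python) =====
-- def method_two(src : list) -> bool:
--     return all(x == 1 or x == 2 for x in src) and 1 in src and 2 in src
-- ===== Notes on version B (the rewrite author's own statement) =====
-- stated objective: simpler
-- what changed: A's single two-flag loop with early return is replaced by three declarative short-circuiting membership scans: all elements in {1,2}, 1 present, 2 present.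
import Mathlib
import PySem

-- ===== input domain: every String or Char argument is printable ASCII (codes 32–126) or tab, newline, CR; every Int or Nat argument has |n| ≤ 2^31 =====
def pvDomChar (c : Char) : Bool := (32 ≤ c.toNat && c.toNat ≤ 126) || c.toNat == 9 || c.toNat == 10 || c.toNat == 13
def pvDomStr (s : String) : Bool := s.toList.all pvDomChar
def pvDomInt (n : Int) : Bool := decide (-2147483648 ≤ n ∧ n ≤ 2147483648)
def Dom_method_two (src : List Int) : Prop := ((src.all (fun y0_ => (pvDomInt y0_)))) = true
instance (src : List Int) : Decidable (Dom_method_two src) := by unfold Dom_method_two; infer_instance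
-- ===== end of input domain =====

-- B: same results via three declarative membership scans instead of A's two-flag early-return loop (simpler).


-- ===== PORT A =====
-- loop with two flags and early return
def methodTwoLoop : List Int → Bool → Bool → Bool
  | [], p1, p2 => p1 && p2
  | x :: xs, p1, p2 =>
    if x = 1 then methodTwoLoop xs true p2
    else if x = 2 then methodTwoLoop xs p1 true
    else false

def method_two (src : List Int) : Bool := methodTwoLoop src false false

-- ===== PORT B =====
def method_two_alt (src : List Int) : Bool :=
  src.all (fun x => x == 1 || x == 2) && src.contains 1 && src.contains 2

-- ===== PRECONDITION & SPEC =====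
def Spec_method_two (src : List Int) (out : Bool) : Prop := out = method_two_alt src
instance (src : List Int) (out : Bool) : Decidable (Spec_method_two src out) := by unfold Spec_method_two; infer_instance

-- ===== CLAIM (what is proved, stated in full; the proofs are below) =====
def Claim_equal_method_two : Prop := ∀ (src : List Int), Dom_method_two src → Spec_method_two src (method_two src)

-- ===== LEMMAS AND PROOFS =====

-- ===== VERDICT (by name: the statement is the Claim_ definition above) =====
lemma methodTwoLoop_eq (xs : List Int) (p1 p2 : Bool) :
    methodTwoLoop xs p1 p2 =
      (xs.all (fun x => x == 1 || x == 2) && (p1 || xs.contains 1) && (p2 || xs.contains 2)) := by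
  induction xs generalizing p1 p2 with
  | nil => simp [methodTwoLoop]
  | cons x xs ih =>
    simp only [methodTwoLoop]
    by_cases h1 : x = 1
    · subst h1; simp [ih]
    · by_cases h2 : x = 2
      · subst h2; simp [ih, h1]
      · simp [h1, h2]

theorem method_two_spec : Claim_equal_method_two := by
  intro src _
  unfold Spec_method_two method_two method_two_alt
  rw [methodTwoLoop_eq]
  simp
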